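-- pv_equiv track=rewrite | github.com/NAGARAMSUNIL/python-slot-c | day-3,exp-6.mirror image.py | solve
-- ===== SOURCE A (Python) =====
-- def solve(n):
--    num_str = str(n)
--    for i in range(len(num_str)):
--       if num_str[i] not in ['0', '1', '8']:
--          return False
--    left = 0
--    right = len(num_str) - 1
--    while left < right:
--       if num_str[left] != num_str[right]:
--          return False
--       left += 1
--       right -= 1
--    return True
-- ===== SOURCE B (Python) =====
-- MIRROR = {'0': '0', '1': '1', '8': '8'}
--
-- def solve(n):
--     s = str(n)
--     return ''.join(MIRROR.get(c, '?') for c in reversed(s)) == s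
-- ===== Notes on version B (the rewrite author's own statement) =====
-- stated objective: idiomatic
-- what changed: B uses the classic mirror-map algorithm: it builds a new string by looking up each character of the reversed string in a mirror dictionary (with '?' for characters that have no mirror) and returns a single whole-string equality against the original, instead of A's explicit membership scan followed by a two-pointer palindrome loop with early returns.
import Mathlib
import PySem

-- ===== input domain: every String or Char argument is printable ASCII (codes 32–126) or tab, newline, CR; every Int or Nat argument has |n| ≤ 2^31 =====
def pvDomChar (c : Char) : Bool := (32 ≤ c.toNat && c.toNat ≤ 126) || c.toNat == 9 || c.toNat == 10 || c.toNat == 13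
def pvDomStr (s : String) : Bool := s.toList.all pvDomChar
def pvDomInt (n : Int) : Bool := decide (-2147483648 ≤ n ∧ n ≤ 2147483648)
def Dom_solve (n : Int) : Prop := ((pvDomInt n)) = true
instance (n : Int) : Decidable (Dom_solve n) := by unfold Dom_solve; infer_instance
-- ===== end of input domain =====

-- B replaces A's membership scan + two-pointer palindrome loop by the mirror-map algorithm:
-- map each char of the reversed string through a mirror dict (default '?') and compare whole strings.


-- ===== PORT A =====
-- for i in range(len(num_str)): if num_str[i] not in ['0','1','8']: return False
def aDigits : List Char → Bool
  | [] => true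
  | c :: rest => if !(['0', '1', '8'].contains c) then false else aDigits rest

-- while left < right: if num_str[left] != num_str[right]: return False; left += 1; right -= 1
-- (indices are always in range in A, so getD's default is never used)
def aPal (s : List Char) (left right : Nat) : Bool :=
  if left < right then
    if s.getD left ' ' ≠ s.getD right ' ' then false
    else aPal s (left + 1) (right - 1)
  else true
termination_by right - left
decreasing_by omega

def solve (n : Int) : Bool :=
  let numStr := PySem.Int.toChars n
  if aDigits numStr = false then false
  else aPal numStr 0 (numStr.length - 1)

-- ===== PORT B =====
-- MIRROR = {'0': '0', '1': '1', '8': '8'}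
def mirrorD : PySem.Dict Char Char :=
  PySem.Dict.ofList [('0', '0'), ('1', '1'), ('8', '8')]

-- ''.join(MIRROR.get(c, '?') for c in reversed(s)) == s
def solve_alt (n : Int) : Bool :=
  let s := PySem.Int.toChars n
  decide (s.reverse.map (fun c => mirrorD.getD c '?') = s)

-- ===== PRECONDITION & SPEC =====
def Spec_solve (n : Int) (out : Bool) : Prop := out = solve_alt n
instance (n : Int) (out : Bool) : Decidable (Spec_solve n out) := by unfold Spec_solve; infer_instance

-- ===== CLAIM (what is proved, stated in full; the proofs are below) =====
def Claim_equal_solve : Prop := ∀ (n : Int), Dom_solve n → Spec_solve n (solve n)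

-- ===== LEMMAS AND PROOFS =====

def memB (c : Char) : Bool := ['0', '1', '8'].contains c

theorem mirror_getD (c : Char) :
    mirrorD.getD c '?' = if memB c then c else '?' := by
  by_cases h0 : c = '0'
  · subst h0; decide
  by_cases h1 : c = '1'
  · subst h1; decide
  by_cases h8 : c = '8'
  · subst h8; decide
  have : memB c = false := by
    simp [memB, h0, h1, h8]
  rw [this]
  simp only [Bool.false_eq_true, if_false]
  have hm : mirrorD = PySem.Dict.mk [('0', '0'), ('1', '1'), ('8', '8')] := by decide
  rw [hm, PySem.Dict.getD_eq_get?_getD]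
  rw [PySem.Dict.get?_mk_cons, PySem.Dict.get?_mk_cons, PySem.Dict.get?_mk_cons]
  have b0 : (('0' : Char) == c) = false := by
    simp only [beq_eq_false_iff_ne]; exact fun e => h0 e.symm
  have b1 : (('1' : Char) == c) = false := by
    simp only [beq_eq_false_iff_ne]; exact fun e => h1 e.symm
  have b8 : (('8' : Char) == c) = false := by
    simp only [beq_eq_false_iff_ne]; exact fun e => h8 e.symm
  rw [b0, b1, b8]
  rfl

theorem aDigits_iff (s : List Char) :
    aDigits s = true ↔ ∀ c ∈ s, memB c = true := by
  induction s with
  | nil => simp [aDigits]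
  | cons c rest ih =>
    cases h : memB c with
    | false =>
      have he : aDigits (c :: rest) = false := by
        show (if !(['0', '1', '8'].contains c) then false else aDigits rest) = false
        have : ['0', '1', '8'].contains c = false := h
        rw [this]; rfl
      rw [he]
      simp only [Bool.false_eq_true, false_iff]
      intro hall
      exact absurd (hall c (List.mem_cons_self ..)) (by simp [h])
    | true =>
      have he : aDigits (c :: rest) = aDigits rest := by
        show (if !(['0', '1', '8'].contains c) then false else aDigits rest) = aDigits rest
        have : ['0', '1', '8'].contains c = true := h
        rw [this]; rfl
      rw [he, ih]
      constructor
      · intro hr c' hc'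
        rcases List.mem_cons.mp hc' with rfl | hc'
        · exact h
        · exact hr _ hc'
      · intro hr c' hc'
        exact hr _ (List.mem_cons_of_mem _ hc')

theorem aPal_iff (s : List Char) (l r m : Nat) (hm : r - l ≤ m) :
    aPal s l r = true ↔ ∀ j, l ≤ j → j < r → s.getD j ' ' = s.getD (l + r - j) ' ' := by
  induction m generalizing l r with
  | zero =>
    rw [aPal, if_neg (by omega)]
    simp only [true_iff]
    intro j h1 h2; omega
  | succ m ih =>
    by_cases hlr : l < r
    · rw [aPal, if_pos hlr]
      by_cases he : s.getD l ' ' = s.getD r ' '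
      · rw [if_neg (by simpa using he), ih (l + 1) (r - 1) (by omega)]
        constructor
        · intro h j hj1 hj2
          rcases Nat.lt_or_ge j (l + 1) with hc | hc
          · have hjl : j = l := by omega
            have e : l + r - j = r := by omega
            rw [e, hjl]; exact he
          · rcases Nat.lt_or_ge j (r - 1) with hd | hd
            · have := h j hc hd
              have e : l + 1 + (r - 1) - j = l + r - j := by omega
              rwa [e] at this
            · have hjr : j = r - 1 := by omega
              rw [hjr]
              rcases Nat.lt_or_ge (l + 1) (r - 1) with hx | hx
              · have := h (l + 1) (by omega) hx
                have e1 : l + 1 + (r - 1) - (l + 1) = r - 1 := by omega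
                rw [e1] at this
                have e2 : l + r - (r - 1) = l + 1 := by omega
                rw [e2, ← this]
              · have hcase : r - 1 = l ∨ r - 1 = l + 1 := by omega
                rcases hcase with h1 | h1
                · rw [h1]
                  have e : l + r - l = r := by omega
                  rw [e]; exact he
                · have e2 : l + r - (r - 1) = l + 1 := by omega
                  rw [e2, h1]
        · intro h j hj1 hj2
          have := h j (by omega) (by omega)
          have e : l + r - j = l + 1 + (r - 1) - j := by omega
          rwa [← e]
      · rw [if_pos (by simpa using he)]
        simp only [Bool.false_eq_true, false_iff]
        intro h
        have := h l (Nat.le_refl l) hlr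
        have e : l + r - l = r := by omega
        rw [e] at this
        exact he this
    · rw [aPal, if_neg hlr]
      simp only [true_iff]
      intro j h1 h2; omega

-- s.reverse = s as a pointwise mirror condition
theorem rev_iff (s : List Char) :
    s.reverse = s ↔ ∀ j, j < s.length → s.getD j ' ' = s.getD (s.length - 1 - j) ' ' := by
  constructor
  · intro h j hj
    rw [List.getD_eq_getElem s ' ' hj,
        List.getD_eq_getElem s ' ' (show s.length - 1 - j < s.length by omega)]
    have e := List.getElem_of_eq h (show j < s.reverse.length by simpa using hj)
    rw [List.getElem_reverse] at e
    exact e.symm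
  · intro h
    apply List.ext_getElem (by simp)
    intro i h1 h2
    rw [List.getElem_reverse]
    have := h i (by omega)
    rw [List.getD_eq_getElem s ' ' (by omega), List.getD_eq_getElem s ' ' (by omega)] at this
    exact this.symm

-- the half-range mirror condition of aPal equals the full-range one
theorem half_full (s : List Char) :
    (∀ j, j < s.length - 1 → s.getD j ' ' = s.getD (0 + (s.length - 1) - j) ' ')
    ↔ ∀ j, j < s.length → s.getD j ' ' = s.getD (s.length - 1 - j) ' ' := by
  constructor
  · intro h j hj
    rcases Nat.lt_or_ge j (s.length - 1) with hc | hc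
    · have := h j hc
      have e : 0 + (s.length - 1) - j = s.length - 1 - j := by omega
      rwa [e] at this
    · have hj1 : j = s.length - 1 := by omega
      subst hj1
      rcases Nat.eq_or_lt_of_le (Nat.zero_le (s.length - 1)) with h0 | h0
      · rw [← h0]
      · have := h 0 h0
        have e : 0 + (s.length - 1) - 0 = s.length - 1 := by omega
        rw [e] at this
        have e2 : s.length - 1 - (s.length - 1) = 0 := by omega
        rw [e2, ← this]
  · intro h j hj
    have := h j (by omega)
    have e : 0 + (s.length - 1) - j = s.length - 1 - j := by omega
    rwa [e]

-- chars produced by Nat.toDigits are digitChar values (or come from the accumulator)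
theorem mem_toDigitsCore (b f n : Nat) (ds : List Char) :
    ∀ c ∈ Nat.toDigitsCore b f n ds, (∃ k, c = Nat.digitChar k) ∨ c ∈ ds := by
  induction f generalizing n ds with
  | zero => intro c hc; exact Or.inr hc
  | succ f ih =>
    intro c hc
    rw [Nat.toDigitsCore] at hc
    by_cases h : n / b = 0
    · rw [if_pos h] at hc
      rcases List.mem_cons.mp hc with rfl | hc
      · exact Or.inl ⟨n % b, rfl⟩
      · exact Or.inr hc
    · rw [if_neg h] at hc
      rcases ih (n / b) (Nat.digitChar (n % b) :: ds) c hc with h1 | h1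
      · exact Or.inl h1
      · rcases List.mem_cons.mp h1 with rfl | h1
        · exact Or.inl ⟨n % b, rfl⟩
        · exact Or.inr h1

theorem digitChar_ne_qmark (k : Nat) : Nat.digitChar k ≠ '?' := by
  rcases Nat.lt_or_ge k 16 with h | h
  · interval_cases k <;> decide
  · have e : Nat.digitChar k = '*' := by
      unfold Nat.digitChar
      rw [if_neg (by omega), if_neg (by omega), if_neg (by omega), if_neg (by omega),
          if_neg (by omega), if_neg (by omega), if_neg (by omega), if_neg (by omega),
          if_neg (by omega), if_neg (by omega), if_neg (by omega), if_neg (by omega),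
          if_neg (by omega), if_neg (by omega), if_neg (by omega), if_neg (by omega)]
    rw [e]; decide

theorem toChars_no_qmark (n : Int) : ∀ c ∈ PySem.Int.toChars n, c ≠ '?' := by
  intro c hc
  unfold PySem.Int.toChars at hc
  split_ifs at hc with h
  · rcases List.mem_cons.mp hc with rfl | hc
    · decide
    · rcases mem_toDigitsCore 10 (n.natAbs + 1) n.natAbs [] c hc with ⟨k, rfl⟩ | h2
      · exact digitChar_ne_qmark k
      · exact absurd h2 (List.not_mem_nil)
  · rcases mem_toDigitsCore 10 (n.toNat + 1) n.toNat [] c hc with ⟨k, rfl⟩ | h2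
    · exact digitChar_ne_qmark k
    · exact absurd h2 (List.not_mem_nil)

-- B's whole-string equality, characterised
theorem bEq_iff (s : List Char) (hq : ∀ c ∈ s, c ≠ '?') :
    s.reverse.map (fun c => mirrorD.getD c '?') = s
    ↔ (∀ c ∈ s, memB c = true) ∧ s.reverse = s := by
  constructor
  · intro h
    have hmem : ∀ c ∈ s, memB c = true := by
      intro c hc
      rw [← h] at hc
      rcases List.mem_map.mp hc with ⟨c', hc', he⟩
      rw [mirror_getD] at he
      by_cases hm : memB c' = true
      · rw [if_pos hm] at he; rw [← he]; exact hm
      · rw [if_neg hm] at he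
        have : c ∈ s := by rw [← h]; exact hc
        exact absurd he.symm (hq c this)
    refine ⟨hmem, ?_⟩
    have hid : s.reverse.map (fun c => mirrorD.getD c '?') = s.reverse := by
      have := List.map_congr_left (l := s.reverse)
        (f := fun c => mirrorD.getD c '?') (g := id)
        (fun c hc => by
          show mirrorD.getD c '?' = id c
          rw [mirror_getD, if_pos (hmem c (List.mem_reverse.mp hc))]; rfl)
      rw [this, List.map_id]
    rw [hid] at h
    exact h
  · rintro ⟨hmem, hrev⟩
    have hid : s.reverse.map (fun c => mirrorD.getD c '?') = s.reverse := by
      have := List.map_congr_left (l := s.reverse)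
        (f := fun c => mirrorD.getD c '?') (g := id)
        (fun c hc => by
          show mirrorD.getD c '?' = id c
          rw [mirror_getD, if_pos (hmem c (List.mem_reverse.mp hc))]; rfl)
      rw [this, List.map_id]
    rw [hid, hrev]

theorem solve_eq_alt (n : Int) : solve n = solve_alt n := by
  unfold solve solve_alt
  set s := PySem.Int.toChars n with hs
  have hq : ∀ c ∈ s, c ≠ '?' := toChars_no_qmark n
  have key : (if aDigits s = false then false else aPal s 0 (s.length - 1)) = true
      ↔ (s.reverse.map (fun c => mirrorD.getD c '?') = s) := by
    rw [bEq_iff s hq]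
    by_cases h : aDigits s = false
    · rw [if_pos h]
      constructor
      · intro hc; exact absurd hc (by simp)
      · rintro ⟨hmem, _⟩
        rw [(aDigits_iff s).mpr hmem] at h
        exact absurd h (by simp)
    · rw [if_neg h]
      have hd : aDigits s = true := by
        cases hx : aDigits s
        · exact absurd hx h
        · rfl
      rw [aPal_iff s 0 (s.length - 1) (s.length - 1) (by omega)]
      rw [aDigits_iff] at hd
      constructor
      · intro hp
        refine ⟨hd, (rev_iff s).mpr ?_⟩
        exact (half_full s).mp (by intro j hj; exact hp j (Nat.zero_le j) hj)
      · rintro ⟨_, hrev⟩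
        intro j _ hj
        exact (half_full s).mpr ((rev_iff s).mp hrev) j hj
  show (if aDigits s = false then false else aPal s 0 (s.length - 1))
      = decide (s.reverse.map (fun c => mirrorD.getD c '?') = s)
  rcases Decidable.em (s.reverse.map (fun c => mirrorD.getD c '?') = s) with hP | hP
  · rw [decide_eq_true hP]
    exact key.mpr hP
  · rw [decide_eq_false hP]
    cases hx : (if aDigits s = false then false else aPal s 0 (s.length - 1)) with
    | false => rfl
    | true => exact absurd (key.mp hx) hP

-- ===== VERDICT (by name: the statement is the Claim_ definition above) =====
theorem solve_spec : Claim_equal_solve := by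
  intro n _
  unfold Spec_solve
  exact solve_eq_alt n
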